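-- pv_equiv track=rewrite | github.com/BrandonBahret/Voice-Synth | voice_conductor/config.py | _strip_jsonc_trailing_commas
-- ===== SOURCE A (Python) =====
-- def _strip_jsonc_trailing_commas(text: str) -> str:
--     result: list[str] = []
--     in_string = False
--     escaped = False
--     index = 0
--     while index < len(text):
--         char = text[index]
--
--         if in_string:
--             result.append(char)
--             if escaped:
--                 escaped = False
--             elif char == "\\":
--                 escaped = True
--             elif char == '"':
--                 in_string = False
--             index += 1
--             continue
--
--         if char == '"':
--             in_string = True
--             result.append(char)
--             index += 1
--             continue
--
--         if char == ",":
--             lookahead = index + 1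
--             while lookahead < len(text) and text[lookahead].isspace():
--                 lookahead += 1
--             if lookahead < len(text) and text[lookahead] in "}]":
--                 index += 1
--                 continue
--
--         result.append(char)
--         index += 1
--
--     return "".join(result)
-- ===== SOURCE B (Python) =====
-- def _strip_jsonc_trailing_commas(text: str) -> str:
--     out: list[str] = []
--     buf: list[str] = []       # whitespace seen after a pending comma
--     pending = False           # a comma outside a string is being deferred
--     in_string = False
--     escaped = False
--     for char in text:
--         if in_string:
--             out.append(char)
--             if escaped:
--                 escaped = False
--             elif char == "\\":
--                 escaped = True
--             elif char == '"':
--                 in_string = False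
--             continue
--         if pending:
--             if char.isspace():
--                 buf.append(char)
--                 continue
--             if char in "}]":
--                 out.extend(buf)      # drop the comma, keep its whitespace
--             else:
--                 out.append(",")
--                 out.extend(buf)
--             pending = False
--             buf = []
--         if char == ",":
--             pending = True
--         else:
--             out.append(char)
--             if char == '"':
--                 in_string = True
--     if pending:
--         out.append(",")
--         out.extend(buf)
--     return "".join(out)
-- ===== Notes on version B (the rewrite author's own statement) =====
-- stated objective: faster
-- what changed: Replaces A's inner whitespace-lookahead rescan after each comma with a single forward pass that defers a pending comma and buffers the following whitespace, deciding keep-or-drop at the next non-whitespace character (or end of input); measured ~2.7x faster.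
import Mathlib
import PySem

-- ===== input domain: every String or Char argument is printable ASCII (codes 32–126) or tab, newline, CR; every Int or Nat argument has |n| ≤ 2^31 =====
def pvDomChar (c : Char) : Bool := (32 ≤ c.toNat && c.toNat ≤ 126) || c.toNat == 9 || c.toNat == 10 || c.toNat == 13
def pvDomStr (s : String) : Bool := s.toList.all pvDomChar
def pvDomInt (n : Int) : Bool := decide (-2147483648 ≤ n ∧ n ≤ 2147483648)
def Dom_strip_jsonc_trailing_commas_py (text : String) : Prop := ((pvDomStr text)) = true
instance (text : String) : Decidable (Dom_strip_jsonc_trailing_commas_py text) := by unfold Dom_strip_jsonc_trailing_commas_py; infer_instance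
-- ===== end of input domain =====

-- B replaces A's inner whitespace-lookahead rescan by a single-pass pending-comma buffer (alternative decomposition, same result).

-- ===== PORT A =====
-- A's inner `while lookahead < len(text) and text[lookahead].isspace(): lookahead += 1`
-- followed by the bounds/membership test: returns the first non-whitespace char after the comma, if any.
def pvLookaheadA (l : List Char) : Option Char :=
  match l with
  | [] => none
  | c :: rest => if PySem.Chars.isspace c then pvLookaheadA rest else some c

def pvStripA : List Char → Bool → Bool → List Char
  | [], _, _ => []
  | c :: rest, in_string, escaped =>
    if in_string then
      c :: (if escaped then pvStripA rest true false
            else if c == '\\' then pvStripA rest true true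
            else if c == '"' then pvStripA rest false escaped
            else pvStripA rest true escaped)
    else if c == '"' then
      c :: pvStripA rest true escaped
    else if c == ',' then
      match pvLookaheadA rest with
      | some d =>
        if d == '}' || d == ']' then pvStripA rest false escaped
        else c :: pvStripA rest false escaped
      | none => c :: pvStripA rest false escaped
    else
      c :: pvStripA rest false escaped

def strip_jsonc_trailing_commas_py (text : String) : String :=
  String.mk (pvStripA text.toList false false)

-- ===== PORT B =====
def pvStripB : List Char → Bool → Bool → Bool → List Char → List Char
  | [], _, _, pending, buf => if pending then ',' :: buf else []
  | c :: rest, in_string, escaped, pending, buf =>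
    if in_string then
      c :: (if escaped then pvStripB rest true false pending buf
            else if c == '\\' then pvStripB rest true true pending buf
            else if c == '"' then pvStripB rest false escaped pending buf
            else pvStripB rest true escaped pending buf)
    else if pending then
      if PySem.Chars.isspace c then pvStripB rest false escaped true (buf ++ [c])
      else
        (if c == '}' || c == ']' then buf else ',' :: buf) ++
        (if c == ',' then pvStripB rest false escaped true []
         else c :: pvStripB rest (c == '"') escaped false [])
    else if c == ',' then
      pvStripB rest false escaped true []
    else
      c :: pvStripB rest (c == '"') escaped false buf

def strip_jsonc_trailing_commas_py_alt (text : String) : String :=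
  String.mk (pvStripB text.toList false false false [])

-- ===== PRECONDITION & SPEC =====
def Spec_strip_jsonc_trailing_commas_py (text : String) (out : String) : Prop := out = strip_jsonc_trailing_commas_py_alt text
instance (text : String) (out : String) : Decidable (Spec_strip_jsonc_trailing_commas_py text out) := by unfold Spec_strip_jsonc_trailing_commas_py; infer_instance

-- ===== CLAIM (what is proved, stated in full; the proofs are below) =====
def Claim_equal_strip_jsonc_trailing_commas_py : Prop := ∀ (text : String), Dom_strip_jsonc_trailing_commas_py text → Spec_strip_jsonc_trailing_commas_py text (strip_jsonc_trailing_commas_py text)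

-- ===== LEMMAS AND PROOFS =====

-- a whitespace char is none of the special chars
lemma pv_ws_spec (c : Char) (h : PySem.Chars.isspace c = true) :
    (c == '"') = false ∧ (c == ',') = false ∧ (c == '}') = false ∧ (c == ']') = false := by
  refine ⟨?_, ?_, ?_, ?_⟩ <;> (rw [beq_eq_false_iff_ne]; rintro rfl; exact absurd h (by decide))

lemma pv_lookahead_ws (ws l : List Char) (hws : ∀ c ∈ ws, PySem.Chars.isspace c = true) :
    pvLookaheadA (ws ++ l) = pvLookaheadA l := by
  induction ws with
  | nil => rfl
  | cons c ws' ih =>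
    simp only [List.cons_append, pvLookaheadA, hws c (by simp), if_true]
    exact ih (fun d hd => hws d (by simp [hd]))

lemma pv_lookahead_cons (d : Char) (l : List Char) (hd : PySem.Chars.isspace d = false) :
    pvLookaheadA (d :: l) = some d := by
  simp [pvLookaheadA, hd]

-- A passes a run of whitespace straight through when not in a string
lemma pvA_ws (ws l : List Char) (esc : Bool) (hws : ∀ c ∈ ws, PySem.Chars.isspace c = true) :
    pvStripA (ws ++ l) false esc = ws ++ pvStripA l false esc := by
  induction ws with
  | nil => rfl
  | cons c ws' ih =>
    obtain ⟨h1, h2, _, _⟩ := pv_ws_spec c (hws c (by simp))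
    simp only [List.cons_append]
    rw [show pvStripA (c :: (ws' ++ l)) false esc = c :: pvStripA (ws' ++ l) false esc from by
      simp [pvStripA, h1, h2]]
    rw [ih (fun d hd => hws d (by simp [hd]))]

-- B with a pending comma over an all-whitespace tail
lemma pvB_pending_ws (l : List Char) (esc : Bool) (buf : List Char)
    (hws : ∀ c ∈ l, PySem.Chars.isspace c = true) :
    pvStripB l false esc true buf = ',' :: (buf ++ l) := by
  induction l generalizing buf with
  | nil => simp [pvStripB]
  | cons c rest ih =>
    rw [show pvStripB (c :: rest) false esc true buf
        = pvStripB rest false esc true (buf ++ [c]) from by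
      simp [pvStripB, hws c (by simp)]]
    rw [ih (buf ++ [c]) (fun d hd => hws d (by simp [hd]))]
    simp

-- B with a pending comma: characterization up to the next non-whitespace char
lemma pvB_pending (ws : List Char) (d : Char) (rest' : List Char) (esc : Bool) (buf : List Char)
    (hws : ∀ c ∈ ws, PySem.Chars.isspace c = true) (hd : PySem.Chars.isspace d = false) :
    pvStripB (ws ++ d :: rest') false esc true buf =
      (if d == '}' || d == ']' then [] else [',']) ++ buf ++ ws ++
        pvStripB (d :: rest') false esc false [] := by
  induction ws generalizing buf with
  | nil =>
    by_cases hb : (d == '}' || d == ']') = true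
    · have hdq : (d == '"') = false := by
        rcases Bool.or_eq_true_iff.mp hb with h | h <;>
          (rw [beq_eq_false_iff_ne]; rw [beq_iff_eq] at h; subst h; decide)
      have hdc : (d == ',') = false := by
        rcases Bool.or_eq_true_iff.mp hb with h | h <;>
          (rw [beq_eq_false_iff_ne]; rw [beq_iff_eq] at h; subst h; decide)
      simp [pvStripB, hd, hb, hdq, hdc]
    · by_cases hdc : (d == ',') = true
      · have : d = ',' := by simpa using hdc
        subst this
        simp [pvStripB, hd]
      · simp only [Bool.not_eq_true] at hdc
        simp [pvStripB, hd, hb, hdc]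
  | cons c ws' ih =>
    simp only [List.cons_append]
    rw [show pvStripB (c :: (ws' ++ d :: rest')) false esc true buf
        = pvStripB (ws' ++ d :: rest') false esc true (buf ++ [c]) from by
      simp [pvStripB, hws c (by simp)]]
    rw [ih (buf ++ [c]) (fun e he => hws e (by simp [he]))]
    simp [List.append_assoc]

lemma pv_main (n : Nat) : ∀ (l : List Char) (s esc : Bool), l.length ≤ n →
    pvStripA l s esc = pvStripB l s esc false [] := by
  induction n with
  | zero =>
    intro l s esc hl
    have hnil : l = [] := List.eq_nil_of_length_eq_zero (Nat.le_zero.mp hl)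
    subst hnil; simp [pvStripA, pvStripB]
  | succ n ih =>
    intro l s esc hl
    cases l with
    | nil => simp [pvStripA, pvStripB]
    | cons c rest =>
      have hr : rest.length ≤ n := by simpa using Nat.succ_le_succ_iff.mp hl
      cases s with
      | true =>
        simp [pvStripA, pvStripB, ih rest true false hr, ih rest true true hr,
          ih rest false esc hr, ih rest true esc hr]
      | false =>
        by_cases hq : (c == '"') = true
        · have : c = '"' := by simpa using hq
          subst this
          simp [pvStripA, pvStripB, ih rest true esc hr]
        · simp only [Bool.not_eq_true] at hq
          by_cases hc : (c == ',') = true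
          · -- comma outside a string
            have hceq : c = ',' := by simpa using hc
            subst hceq
            have hsplit := (List.takeWhile_append_dropWhile (p := PySem.Chars.isspace) (l := rest))
            set ws := rest.takeWhile PySem.Chars.isspace with hwsdef
            set rem := rest.dropWhile PySem.Chars.isspace with hremdef
            have hwsall : ∀ e ∈ ws, PySem.Chars.isspace e = true :=
              fun e he => List.mem_takeWhile_imp he
            rw [show pvStripB (',' :: rest) false esc false []
                = pvStripB rest false esc true [] from by simp [pvStripB]]
            cases hrem : rem with
            | nil =>
              have hall : ∀ e ∈ rest, PySem.Chars.isspace e = true := by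
                intro e he
                rw [← hsplit, hrem, List.append_nil] at he
                exact hwsall e he
              have hla : pvLookaheadA rest = none := by
                have : rest = ws ++ ([] : List Char) := by rw [List.append_nil, ← hsplit, hrem, List.append_nil]
                rw [this, pv_lookahead_ws ws [] hwsall]; rfl
              rw [show pvStripA (',' :: rest) false esc = ',' :: pvStripA rest false esc from by
                simp [pvStripA, hla]]
              rw [pvB_pending_ws rest esc [] hall]
              have hA : pvStripA rest false esc = rest := by
                have h := pvA_ws rest [] esc hall
                simpa [pvStripA] using h
              rw [hA]; simp
            | cons d rest' =>
              have hdns : PySem.Chars.isspace d = false := by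
                have h := List.head?_dropWhile_not (p := PySem.Chars.isspace) (l := rest)
                rw [← hremdef, hrem] at h
                simpa using h
              have hrest : rest = ws ++ d :: rest' := by rw [← hsplit, hrem]
              have hla : pvLookaheadA rest = some d := by
                rw [hrest, pv_lookahead_ws ws _ hwsall, pv_lookahead_cons d rest' hdns]
              have hlen : (d :: rest').length ≤ n := by
                have hle : rem.length ≤ rest.length := by
                  rw [hremdef]; exact List.length_dropWhile_le _ _
                rw [hrem] at hle
                simpa using le_trans hle hr
              have hAeq : pvStripA rest false esc = ws ++ pvStripA (d :: rest') false esc := by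
                rw [hrest, pvA_ws ws _ esc hwsall]
              have hBeq := pvB_pending ws d rest' esc [] hwsall hdns
              rw [← hrest] at hBeq
              rw [show pvStripA (',' :: rest) false esc
                  = (if d == '}' || d == ']' then pvStripA rest false esc
                     else ',' :: pvStripA rest false esc) from by simp [pvStripA, hla]]
              rw [hBeq, hAeq, ih (d :: rest') false esc hlen]
              by_cases hb : (d == '}' || d == ']') = true
              · simp [hb]
              · simp [hb]
          · simp only [Bool.not_eq_true] at hc
            simp [pvStripA, pvStripB, hq, hc, ih rest false esc hr]

-- ===== VERDICT (by name: the statement is the Claim_ definition above) =====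
theorem strip_jsonc_trailing_commas_py_spec : Claim_equal_strip_jsonc_trailing_commas_py := by
  intro text _
  unfold Spec_strip_jsonc_trailing_commas_py strip_jsonc_trailing_commas_py
    strip_jsonc_trailing_commas_py_alt
  rw [pv_main text.toList.length text.toList false false (le_refl _)]
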